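-- pv_equiv track=rewrite | github.com/oimiragieo/reveng-main | src/tools/tools/security/complexity_scorer.py | _calculate_nesting
-- ===== SOURCE A (Python) =====
-- def _calculate_nesting(func_body: str) -> int:
--     """Calculate maximum nesting depth"""
--     max_depth = 0
--     current_depth = 0
--
--     for char in func_body:
--         if char == '{':
--             current_depth += 1
--             max_depth = max(max_depth, current_depth)
--         elif char == '}':
--             current_depth -= 1
--
--     return max_depth
-- ===== SOURCE B (Python) =====
-- def _calculate_nesting(func_body: str) -> int:
--     """Calculate maximum nesting depth"""
--     # Right-to-left fold using the suffix recurrence M(c + s) = max(0, delta(c) + M(s)):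
--     # a single clamped accumulator, no running depth and no separate max variable.
--     m = 0
--     for char in reversed(func_body):
--         if char == '{':
--             m = m + 1
--         elif char == '}':
--             m = max(0, m - 1)
--     return m
-- ===== Notes on version B (the rewrite author's own statement) =====
-- stated objective: alternative
-- what changed: Replaces the left-to-right scan maintaining (max_depth, current_depth) by a right-to-left fold over the string using the suffix recurrence M(c+s)=max(0,delta(c)+M(s)), keeping a single clamped accumulator and no running depth or max variable.
import Mathlib
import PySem

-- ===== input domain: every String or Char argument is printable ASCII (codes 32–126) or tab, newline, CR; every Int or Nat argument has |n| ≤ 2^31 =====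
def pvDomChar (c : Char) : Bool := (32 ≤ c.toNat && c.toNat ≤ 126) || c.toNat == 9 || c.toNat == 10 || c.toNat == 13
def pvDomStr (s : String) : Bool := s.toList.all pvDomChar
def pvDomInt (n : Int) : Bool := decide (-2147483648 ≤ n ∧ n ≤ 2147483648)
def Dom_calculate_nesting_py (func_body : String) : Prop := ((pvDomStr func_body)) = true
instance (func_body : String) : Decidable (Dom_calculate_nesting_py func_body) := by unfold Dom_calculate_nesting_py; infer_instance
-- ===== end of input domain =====

-- B computes the same max brace depth right-to-left by the suffix recurrence M(c+s)=max(0,delta(c)+M(s)),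
-- with one clamped accumulator instead of A's (max_depth, current_depth) pair (alternative; same cost).

-- ===== PORT A =====
-- A's loop: state (max_depth, current_depth), branch order as in the Python.
def calculate_nesting_py (func_body : String) : Int :=
  (func_body.toList.foldl
    (fun (st : Int × Int) (char : Char) =>
      if char = '{' then (max st.1 (st.2 + 1), st.2 + 1)
      else if char = '}' then (st.1, st.2 - 1)
      else st)
    (0, 0)).1

-- ===== PORT B =====
-- B's loop over reversed(func_body) with one accumulator m = foldr over the char list.
def calculate_nesting_py_alt (func_body : String) : Int :=
  func_body.toList.foldr
    (fun (char : Char) (m : Int) =>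
      if char = '{' then m + 1
      else if char = '}' then max 0 (m - 1)
      else m)
    0

-- ===== PRECONDITION & SPEC =====
def Spec_calculate_nesting_py (func_body : String) (out : Int) : Prop := out = calculate_nesting_py_alt func_body
instance (func_body : String) (out : Int) : Decidable (Spec_calculate_nesting_py func_body out) := by unfold Spec_calculate_nesting_py; infer_instance

-- ===== CLAIM (what is proved, stated in full; the proofs are below) =====
def Claim_equal_calculate_nesting_py : Prop := ∀ (func_body : String), Dom_calculate_nesting_py func_body → Spec_calculate_nesting_py func_body (calculate_nesting_py func_body)

-- ===== LEMMAS AND PROOFS =====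

-- B's suffix value is never negative.
theorem alt_foldr_nonneg (cs : List Char) :
    0 ≤ cs.foldr
      (fun (char : Char) (m : Int) =>
        if char = '{' then m + 1
        else if char = '}' then max 0 (m - 1)
        else m)
      0 := by
  induction cs with
  | nil => simp
  | cons c cs ih =>
    simp only [List.foldr_cons]
    split_ifs <;> omega

-- A's loop from state (md, cd), cd ≤ md, returns max md (cd + B's suffix value).
theorem loop_eq_suffix (cs : List Char) : ∀ (md cd : Int), cd ≤ md →
    (cs.foldl
      (fun (st : Int × Int) (char : Char) =>
        if char = '{' then (max st.1 (st.2 + 1), st.2 + 1)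
        else if char = '}' then (st.1, st.2 - 1)
        else st)
      (md, cd)).1
    = max md (cd + cs.foldr
        (fun (char : Char) (m : Int) =>
          if char = '{' then m + 1
          else if char = '}' then max 0 (m - 1)
          else m)
        0) := by
  induction cs with
  | nil => intro md cd h; simp; omega
  | cons c cs ih =>
    intro md cd h
    have hn := alt_foldr_nonneg cs
    by_cases h1 : c = '{'
    · simp only [List.foldl_cons, List.foldr_cons, if_pos h1]
      rw [ih (max md (cd + 1)) (cd + 1) (le_max_right _ _)]
      omega
    · by_cases h2 : c = '}'
      · simp only [List.foldl_cons, List.foldr_cons, if_neg h1, if_pos h2]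
        rw [ih md (cd - 1) (by omega)]
        omega
      · simp only [List.foldl_cons, List.foldr_cons, if_neg h1, if_neg h2]
        exact ih md cd h

-- ===== VERDICT (by name: the statement is the Claim_ definition above) =====
theorem calculate_nesting_py_spec : Claim_equal_calculate_nesting_py := by
  intro s _
  show calculate_nesting_py s = calculate_nesting_py_alt s
  unfold calculate_nesting_py calculate_nesting_py_alt
  rw [loop_eq_suffix s.toList 0 0 le_rfl]
  have := alt_foldr_nonneg s.toList
  omega
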